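-- pv_equiv track=rewrite | github.com/kupl/Graphick | Heap_Abstracton/heap_merge_strategies.py | strategy_clinit
-- ===== SOURCE A (Python) =====
-- def strategy_clinit(type_heaps_map):
--   print ('Strategy: clinit')
--   rst = {}
--   for typ in type_heaps_map.keys():
--     same_type_heaps = type_heaps_map[typ]
--     rep = ''
--     for heap in same_type_heaps:
--       if 'clinit' in heap:
--         if rep == '':
--           rep = heap
--         rst[heap] = rep
--       else:
--         rst[heap] = heap
--
--   return rst
-- ===== SOURCE B (Python) =====
-- def strategy_clinit(type_heaps_map):
--     print('Strategy: clinit')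
--     rst = {}
--     for typ in type_heaps_map.keys():
--         same_type_heaps = type_heaps_map[typ]
--         # phase 1: find the representative (first clinit heap, '' if none)
--         rep = next((h for h in same_type_heaps if 'clinit' in h), '')
--         # phase 2: map every heap of this type
--         for heap in same_type_heaps:
--             rst[heap] = rep if 'clinit' in heap else heap
--     return rst
-- ===== Notes on version B (the rewrite author's own statement) =====
-- stated objective: simpler
-- what changed: Replaces the stateful inline 'set rep on first match' inner loop by an explicit find-representative phase (next(...) over the type's heaps) followed by a stateless mapping pass, removing the mutable rep/'' sentinel logic from the insertion loop.
import Mathlib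
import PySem

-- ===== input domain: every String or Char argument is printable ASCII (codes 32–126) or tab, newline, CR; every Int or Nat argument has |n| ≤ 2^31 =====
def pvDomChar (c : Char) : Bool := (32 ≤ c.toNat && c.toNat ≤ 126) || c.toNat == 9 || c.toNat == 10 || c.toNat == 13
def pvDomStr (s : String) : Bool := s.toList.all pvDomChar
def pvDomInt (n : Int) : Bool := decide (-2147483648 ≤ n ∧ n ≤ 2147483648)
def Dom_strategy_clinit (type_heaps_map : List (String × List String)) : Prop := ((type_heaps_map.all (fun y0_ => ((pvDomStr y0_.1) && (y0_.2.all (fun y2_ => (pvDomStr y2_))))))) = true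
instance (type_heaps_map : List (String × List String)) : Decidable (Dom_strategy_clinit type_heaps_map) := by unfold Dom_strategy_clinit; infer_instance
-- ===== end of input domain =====

-- B replaces A's stateful inline "set rep on first clinit match" inner loop by an explicit
-- find-representative phase followed by a stateless mapping pass (objective: simpler).
-- The print('Strategy: clinit') side effect is kept in B and is not modelled here (return value only).

-- ===== PORT A =====
-- inner loop state: (rst, rep)
def clinitStepA (st : PySem.Dict String String × String) (heap : String) : PySem.Dict String String × String :=
  if PySem.Str.isIn "clinit" heap then
    let rep := if st.2 == "" then heap else st.2
    (st.1.insert heap rep, rep)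
  else
    (st.1.insert heap heap, st.2)

def strategy_clinit (type_heaps_map : List (String × List String)) : List (String × String) :=
  let d : PySem.Dict String (List String) := PySem.Dict.mk type_heaps_map
  (d.keys.foldl (fun rst typ =>
      let same_type_heaps := d.getD typ []
      (same_type_heaps.foldl clinitStepA (rst, "")).1)
    PySem.Dict.empty).items

-- ===== PORT B =====
-- phase 1: the representative of a type's heaps = next((h for h in heaps if 'clinit' in h), '')
def clinitRep (heaps : List String) : String :=
  (heaps.find? (fun h => PySem.Str.isIn "clinit" h)).getD ""

-- phase 2: stateless mapping step for a fixed representative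
def clinitStepB (rep : String) (rst : PySem.Dict String String) (heap : String) : PySem.Dict String String :=
  rst.insert heap (if PySem.Str.isIn "clinit" heap then rep else heap)

def strategy_clinit_alt (type_heaps_map : List (String × List String)) : List (String × String) :=
  let d : PySem.Dict String (List String) := PySem.Dict.mk type_heaps_map
  (d.keys.foldl (fun rst typ =>
      let same_type_heaps := d.getD typ []
      same_type_heaps.foldl (clinitStepB (clinitRep same_type_heaps)) rst)
    PySem.Dict.empty).items

-- ===== PRECONDITION & SPEC =====
def Spec_strategy_clinit (type_heaps_map : List (String × List String)) (out : List (String × String)) : Prop := out = strategy_clinit_alt type_heaps_map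
instance (type_heaps_map : List (String × List String)) (out : List (String × String)) : Decidable (Spec_strategy_clinit type_heaps_map out) := by unfold Spec_strategy_clinit; infer_instance

-- ===== CLAIM (what is proved, stated in full; the proofs are below) =====
def Claim_equal_strategy_clinit : Prop := ∀ (type_heaps_map : List (String × List String)), Dom_strategy_clinit type_heaps_map → Spec_strategy_clinit type_heaps_map (strategy_clinit type_heaps_map)

-- ===== LEMMAS AND PROOFS =====

-- a heap containing the substring "clinit" is nonempty
lemma clinit_ne_empty {h : String} (hin : PySem.Str.isIn "clinit" h = true) : h ≠ "" := by
  intro he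
  subst he
  rw [PySem.Str.isIn_iff_infix] at hin
  simp at hin

-- once rep is set (nonempty), A's inner loop is B's stateless mapping loop with that rep
lemma loopA_of_ne (heaps : List String) (rst : PySem.Dict String String) (rep : String)
    (hne : rep ≠ "") :
    heaps.foldl clinitStepA (rst, rep) = (heaps.foldl (clinitStepB rep) rst, rep) := by
  induction heaps generalizing rst with
  | nil => rfl
  | cons h t ih =>
    by_cases hc : PySem.Str.isIn "clinit" h = true
    · simp only [List.foldl_cons, clinitStepA, clinitStepB, hc, if_true]
      have : (rep == "") = false := beq_eq_false_iff_ne.mpr hne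
      simp only [this, Bool.false_eq_true, if_false]
      exact ih _
    · simp only [List.foldl_cons, clinitStepA, clinitStepB, hc, Bool.false_eq_true, if_false]
      exact ih _

-- A's inner loop starting with rep = '' equals B's two-phase computation
lemma loopA_eq_loopB (heaps : List String) (rst : PySem.Dict String String) :
    (heaps.foldl clinitStepA (rst, "")).1 = heaps.foldl (clinitStepB (clinitRep heaps)) rst := by
  induction heaps generalizing rst with
  | nil => rfl
  | cons h t ih =>
    by_cases hc : PySem.Str.isIn "clinit" h = true
    · have hc' : PySem.Chars.isIn ['c','l','i','n','i','t'] h.toList = true := hc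
      have hrep : clinitRep (h :: t) = h := by
        simp [clinitRep, List.find?, hc']
      simp only [List.foldl_cons, clinitStepA, hc, if_true, hrep, clinitStepB]
      have hEmpty : (("" : String) == "") = true := by decide
      simp only [hEmpty, if_true]
      rw [loopA_of_ne t _ h (clinit_ne_empty hc)]
    · have hc' : ¬ PySem.Chars.isIn ['c','l','i','n','i','t'] h.toList = true := hc
      have hrep : clinitRep (h :: t) = clinitRep t := by
        simp [clinitRep, List.find?, hc']
      simp only [List.foldl_cons, clinitStepA, hc, Bool.false_eq_true, if_false, hrep, clinitStepB]
      exact ih _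

-- ===== VERDICT (by name: the statement is the Claim_ definition above) =====
theorem strategy_clinit_spec : Claim_equal_strategy_clinit := by
  intro m _
  unfold Spec_strategy_clinit strategy_clinit strategy_clinit_alt
  have key : ∀ (d : PySem.Dict String (List String)),
      List.foldl (fun rst typ => (List.foldl clinitStepA (rst, "") (d.getD typ [])).1)
        PySem.Dict.empty d.keys
      = List.foldl (fun rst typ => List.foldl (clinitStepB (clinitRep (d.getD typ []))) rst (d.getD typ []))
        PySem.Dict.empty d.keys := by
    intro d
    congr 1
    funext rst typ
    exact loopA_eq_loopB _ _
  exact congrArg PySem.Dict.items (key (PySem.Dict.mk m))
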